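-- pv_equiv track=rewrite | github.com/joycevandersel/joycevandersel | Rosalind_problems/Connected_components.py | conecting_dict
-- ===== SOURCE A (Python) =====
-- def conecting_dict(dic):
--     """Combines all values from dictionary into unique sets
--
--     :input:
--         dic:dict; the key represents a node, the value is a list of nodes
--                 it is connected to.
--     :return:
--      out:list of sets; it is a list containing sets of numbers
--
--     This function takes every the first list of a nested list in a while loop
--     until it is empty. Then it makes sets of the first item in a list and
--     compares this to the already excisting sets. The excisting set gets
--     extended or if it does not excist it is added.
--     """
--     con=list(dic.values())
--     graphs = []
--     while len(con) > 0:
--         first, *rest = con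
--         first = set(first)
--         x = -1
--         while len(first) > x:
--             x = len(first)
--             rest2 = []
--             for r in rest:
--                 if len(first.intersection(set(r))) > 0:
--                     first |= set(r)
--                 else:
--                     rest2.append(r)
--             rest = rest2
--         graphs.append(first)
--         con = rest
--     return(graphs)
-- ===== SOURCE B (Python) =====
-- def conecting_dict(dic):
--     """Graph-traversal re-implementation: instead of repeated full sweeps with
--     set intersections until the component size stabilises, grow each component
--     with a worklist of NODES: pop a node, pull out every remaining list that
--     contains it, and push the newly seen elements."""
--     pool = list(dic.values())
--     graphs = []
--     while pool:
--         seed, rest = pool[0], pool[1:]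
--         comp = set()
--         stack = []
--         for v in seed:
--             if v not in comp:
--                 comp.add(v)
--                 stack.append(v)
--         while stack:
--             node = stack.pop()
--             hits = [l for l in rest if node in l]
--             rest = [l for l in rest if node not in l]
--             for lst in hits:
--                 for v in lst:
--                     if v not in comp:
--                         comp.add(v)
--                         stack.append(v)
--         graphs.append(comp)
--         pool = rest
--     return graphs
-- ===== Notes on version B (the rewrite author's own statement) =====
-- stated objective: alternative
-- what changed: B replaces A's repeated full sweeps with set-intersection tests until the component size stabilises by a graph traversal: a worklist of nodes per component, popping a node, extracting every remaining list that contains it and pushing its newly seen elements, so each list is tested against single nodes and absorbed exactly once instead of re-intersected across passes.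
import Mathlib
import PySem

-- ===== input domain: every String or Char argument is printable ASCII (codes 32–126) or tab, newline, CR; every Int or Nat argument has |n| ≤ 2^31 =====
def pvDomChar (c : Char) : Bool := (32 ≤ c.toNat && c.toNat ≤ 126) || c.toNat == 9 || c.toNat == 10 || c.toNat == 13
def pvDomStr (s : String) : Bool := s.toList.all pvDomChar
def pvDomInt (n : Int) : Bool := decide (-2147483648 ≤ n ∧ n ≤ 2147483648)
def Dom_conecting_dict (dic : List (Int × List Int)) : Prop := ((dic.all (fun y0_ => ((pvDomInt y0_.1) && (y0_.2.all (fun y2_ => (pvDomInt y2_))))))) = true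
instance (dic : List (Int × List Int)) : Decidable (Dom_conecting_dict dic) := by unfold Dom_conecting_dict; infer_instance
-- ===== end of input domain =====

-- B replaces A's repeated whole-pool sweeps with set intersections by a graph traversal:
-- a worklist of nodes, popping a node and extracting every remaining list that contains it.
-- Both programs return Python SETS, whose iteration order is not modelled (PYSEM.md): each
-- component is therefore appended in canonical sorted order in BOTH ports; the equivalence
-- proved is about the returned components as finite sets, in their common outer order.

-- ===== PORT A =====
-- one pass of A's inner while loop: 'for r in rest: if len(first & set(r)) > 0: first |= set(r) else rest2.append(r)'
def pvA_pass (st : PySem.Set Int × List (List Int)) (r : List Int) : PySem.Set Int × List (List Int) :=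
  if 0 < (PySem.Set.inter st.1 (PySem.Set.ofList r)).length then
    (PySem.Set.union st.1 (PySem.Set.ofList r), st.2)
  else
    (st.1, st.2 ++ [r])

-- A's inner 'while len(first) > x: x = len(first); <one pass>'; the fuel only bounds the
-- number of iterations: every iteration that repeats absorbed a list, so rest.length + 2
-- iterations are never reached (the callers pass exactly that)
def pvA_inner : Nat → Int → PySem.Set Int → List (List Int) → PySem.Set Int × List (List Int)
  | 0, _, first, rest => (first, rest)
  | fuel + 1, x, first, rest =>
    if x < (first.length : Int) then
      pvA_inner fuel (first.length : Int)
        (rest.foldl pvA_pass (first, [])).1 (rest.foldl pvA_pass (first, [])).2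
    else
      (first, rest)

-- A's outer 'while len(con) > 0: first, *rest = con; …; graphs.append(first); con = rest';
-- each iteration consumes at least the head list, so con.length + 1 fuel is never exhausted;
-- the appended component (a Python set) is written in canonical sorted order
def pvA_outer : Nat → List (List Int) → List (List Int) → List (List Int)
  | 0, _, graphs => graphs
  | _ + 1, [], graphs => graphs
  | fuel + 1, first :: rest, graphs =>
    pvA_outer fuel (pvA_inner (rest.length + 2) (-1) (PySem.Set.ofList first) rest).2
      (graphs ++ [PySem.List.sorted (pvA_inner (rest.length + 2) (-1) (PySem.Set.ofList first) rest).1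
        (fun x : Int => x) false])

def conecting_dict (dic : List (Int × List Int)) : List (List Int) :=
  pvA_outer ((PySem.Dict.ofList dic).values.length + 1) (PySem.Dict.ofList dic).values []

-- ===== PORT B =====
-- 'if v not in comp: comp.add(v); stack.append(v)'
def pvB_push (st : PySem.Set Int × List Int) (v : Int) : PySem.Set Int × List Int :=
  if PySem.Set.contains st.1 v then st else (PySem.Set.add st.1 v, st.2 ++ [v])

-- B's 'while stack: node = stack.pop(); hits/rest by membership of node; absorb hits'.
-- Each iteration pops one node and pushes at most the total length of the extracted lists,
-- so stack.length + sum of list lengths + 1 fuel is never exhausted (the callers pass that)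
def pvB_dfs : Nat → PySem.Set Int → List Int → List (List Int) → PySem.Set Int × List (List Int)
  | 0, comp, _, rest => (comp, rest)
  | fuel + 1, comp, stack, rest =>
    match stack.getLast? with
    | none => (comp, rest)
    | some node =>
      let hits := rest.filter (fun l => decide (node ∈ l))
      let rest' := rest.filter (fun l => !decide (node ∈ l))
      let st := hits.foldl (fun st l => l.foldl pvB_push st) (comp, stack.dropLast)
      pvB_dfs fuel st.1 st.2 rest'

-- B's outer 'while pool: seed, rest = pool[0], pool[1:]; …; graphs.append(comp); pool = rest';
-- the appended component (a Python set) is written in canonical sorted order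
def pvB_outer : Nat → List (List Int) → List (List Int) → List (List Int)
  | 0, _, graphs => graphs
  | _ + 1, [], graphs => graphs
  | fuel + 1, seed :: rest, graphs =>
    pvB_outer fuel
      (pvB_dfs (seed.length + (rest.map List.length).sum + 1)
        (seed.foldl pvB_push (PySem.Set.empty, [])).1
        (seed.foldl pvB_push (PySem.Set.empty, [])).2 rest).2
      (graphs ++ [PySem.List.sorted
        (pvB_dfs (seed.length + (rest.map List.length).sum + 1)
          (seed.foldl pvB_push (PySem.Set.empty, [])).1
          (seed.foldl pvB_push (PySem.Set.empty, [])).2 rest).1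
        (fun x : Int => x) false])

def conecting_dict_alt (dic : List (Int × List Int)) : List (List Int) :=
  pvB_outer ((PySem.Dict.ofList dic).values.length + 1) (PySem.Dict.ofList dic).values []

-- ===== PRECONDITION & SPEC =====
def Spec_conecting_dict (dic : List (Int × List Int)) (out : List (List Int)) : Prop := out = conecting_dict_alt dic
instance (dic : List (Int × List Int)) (out : List (List Int)) : Decidable (Spec_conecting_dict dic out) := by unfold Spec_conecting_dict; infer_instance

-- ===== CLAIM (what is proved, stated in full; the proofs are below) =====
def Claim_equal_conecting_dict : Prop := ∀ (dic : List (Int × List Int)), Dom_conecting_dict dic → Spec_conecting_dict dic (conecting_dict dic)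

-- ===== LEMMAS AND PROOFS =====

-- chain-reachability of a pool list from a seed list: it shares an element with the seed
-- or with an already-reachable list (proof-only helper)
inductive pvReach (seed : List Int) (pool : List (List Int)) : List Int → Prop
  | base (r : List Int) (hr : r ∈ pool) (y : Int) (hy : y ∈ r) (hs : y ∈ seed) : pvReach seed pool r
  | step (r r' : List Int) (hr : r ∈ pool) (h : pvReach seed pool r') (y : Int) (hy : y ∈ r) (hy' : y ∈ r') : pvReach seed pool r

-- a node belongs to the component generated by seed: it is in the seed or on a reachable list
def pvQ (seed : List Int) (pool : List (List Int)) (z : Int) : Prop :=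
  z ∈ seed ∨ ∃ r, pvReach seed pool r ∧ z ∈ r

-- common post-condition of A's inner saturation loop and B's node-worklist loop
def pvPost (m : PySem.Set Int) (rest : List (List Int)) (res : PySem.Set Int × List (List Int)) : Prop :=
  (∃ ex, res.1 = m ++ ex) ∧
  (∀ r ∈ res.2, ∀ y ∈ r, y ∉ res.1) ∧
  (∀ r ∈ rest, (∃ y ∈ r, y ∈ res.1) → ∀ y ∈ r, y ∈ res.1) ∧
  (res.2 = rest.filter (fun r => decide (∀ y ∈ r, y ∉ res.1))) ∧
  (∀ seed pool, (∀ r ∈ rest, r ∈ pool) → (∀ z ∈ m, pvQ seed pool z) → ∀ z ∈ res.1, pvQ seed pool z) ∧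
  (m.Nodup → res.1.Nodup)

-- the characterisation both components satisfy: the set is exactly the seed plus the
-- reachable lists, and the kept pool is the order-preserving filter of the disjoint lists
def pvIface (seed : List Int) (pool : List (List Int)) (res : PySem.Set Int × List (List Int)) : Prop :=
  res.1.Nodup ∧ (∀ z, z ∈ res.1 ↔ pvQ seed pool z) ∧
  res.2 = pool.filter (fun r => decide (∀ y ∈ r, y ∉ res.1))

-- ---- A-side pass lemmas ----
theorem pvA_pass_len (rest : List (List Int)) (first : PySem.Set Int) (acc : List (List Int)) :
    (rest.foldl pvA_pass (first, acc)).2.length ≤ acc.length + rest.length ∧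
    (first.length < (rest.foldl pvA_pass (first, acc)).1.length →
      (rest.foldl pvA_pass (first, acc)).2.length < acc.length + rest.length) := by
  induction rest generalizing first acc with
  | nil => simp
  | cons r rest ih =>
    simp only [List.foldl_cons, pvA_pass]
    split_ifs with h
    · have h1 := (ih (PySem.Set.union first (PySem.Set.ofList r)) acc).1
      constructor
      · simpa using h1.trans (by omega)
      · intro _; simp only [List.length_cons]; omega
    · have h1 := ih first (acc ++ [r])
      simp only [List.length_append, List.length_cons, List.length_nil] at h1 ⊢
      constructor
      · omega
      · intro hg; have := h1.2 hg; omega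

theorem pv_cond_bridge (m : PySem.Set Int) (r : List Int) :
    PySem.Set.isdisjoint m (PySem.List.dedup r) = true ↔
      ¬ 0 < (PySem.Set.inter m (PySem.Set.ofList r)).length := by
  rw [PySem.Set.isdisjoint_iff]
  simp only [List.length_pos_iff, ne_eq, not_not, List.eq_nil_iff_forall_not_mem,
    PySem.Set.mem_inter, PySem.List.dedup_eq_ofList, PySem.Set.mem_ofList, not_and]

theorem pv_pass_mono (rest : List (List Int)) : ∀ (m : PySem.Set Int) (acc : List (List Int)),
    ∃ ex, (rest.foldl pvA_pass (m, acc)).1 = m ++ ex := by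
  induction rest with
  | nil => exact fun m acc => ⟨[], by simp⟩
  | cons r rest ih =>
    intro m acc
    simp only [List.foldl_cons, pvA_pass]
    split_ifs with h
    · obtain ⟨ex, hex⟩ := ih (PySem.Set.union m (PySem.Set.ofList r)) acc
      rw [hex, PySem.Set.union, PySem.Set.update_eq_append_filter]
      exact ⟨_, by rw [List.append_assoc]⟩
    · exact ih m (acc ++ [r])

theorem pv_pass_nogrow (rest : List (List Int)) :
    ∀ (m : PySem.Set Int) (acc : List (List Int)),
    (rest.foldl pvA_pass (m, acc)).1 = m →
    (rest.foldl pvA_pass (m, acc)).2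
      = acc ++ rest.filter (fun r => PySem.Set.isdisjoint m (PySem.List.dedup r)) := by
  induction rest with
  | nil => simp
  | cons r rest ih =>
    intro m acc h
    simp only [List.foldl_cons, pvA_pass] at h ⊢
    by_cases hc : 0 < (PySem.Set.inter m (PySem.Set.ofList r)).length
    · rw [if_pos hc] at h ⊢
      have hu : PySem.Set.union m (PySem.Set.ofList r) = m := by
        obtain ⟨ex, hex⟩ := pv_pass_mono rest (PySem.Set.union m (PySem.Set.ofList r)) acc
        rw [h] at hex
        rw [PySem.Set.union, PySem.Set.update_eq_append_filter, List.append_assoc] at hex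
        rcases List.append_eq_nil_iff.mp (List.self_eq_append_right.mp hex) with ⟨h1, _⟩
        rw [PySem.Set.union, PySem.Set.update_eq_append_filter, h1, List.append_nil]
      rw [hu] at h ⊢
      have hd : PySem.Set.isdisjoint m (PySem.List.dedup r) = false := by
        rw [← Bool.not_eq_true, pv_cond_bridge]; exact not_not_intro hc
      rw [ih m acc h, List.filter_cons, hd]
      simp
    · rw [if_neg hc] at h ⊢
      have hd : PySem.Set.isdisjoint m (PySem.List.dedup r) = true := by
        rw [pv_cond_bridge]; exact hc
      rw [ih m (acc ++ [r]) h, List.filter_cons, hd]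
      simp


-- the kept accumulator only ever grows
theorem pv_pass_acc (rest : List (List Int)) : ∀ (m : PySem.Set Int) (acc : List (List Int)),
    ∃ ex, (rest.foldl pvA_pass (m, acc)).2 = acc ++ ex := by
  induction rest with
  | nil => exact fun m acc => ⟨[], by simp⟩
  | cons r rs ih =>
    intro m acc
    simp only [List.foldl_cons, pvA_pass]
    split_ifs with h
    · exact ih _ acc
    · obtain ⟨ex, hex⟩ := ih m (acc ++ [r])
      exact ⟨[r] ++ ex, by rw [hex, List.append_assoc]⟩

-- a nonempty intersection yields a shared element
theorem pv_inter_mem (m : PySem.Set Int) (r : List Int)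
    (h : 0 < (PySem.Set.inter m (PySem.Set.ofList r)).length) :
    ∃ y, y ∈ m ∧ y ∈ r := by
  obtain ⟨y, hy⟩ := List.exists_mem_of_ne_nil _ (List.length_pos_iff.mp h)
  rw [PySem.Set.mem_inter, PySem.Set.mem_ofList] at hy
  exact ⟨y, hy⟩

theorem pv_pass_absorbed (rest : List (List Int)) :
    ∀ (m : PySem.Set Int) (acc : List (List Int)), ∀ r ∈ rest,
    r ∈ (rest.foldl pvA_pass (m, acc)).2 ∨
      ((∃ y ∈ r, y ∈ (rest.foldl pvA_pass (m, acc)).1) ∧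
        ∀ y ∈ r, y ∈ (rest.foldl pvA_pass (m, acc)).1) := by
  induction rest with
  | nil => simp
  | cons r0 rs ih =>
    intro m acc r hr
    simp only [List.foldl_cons, pvA_pass]
    by_cases h : 0 < (PySem.Set.inter m (PySem.Set.ofList r0)).length
    · simp only [if_pos h]
      rcases List.mem_cons.mp hr with heq | htl
      · right
        subst heq
        obtain ⟨y, hym, hyr⟩ := pv_inter_mem m r h
        obtain ⟨ex, hex⟩ := pv_pass_mono rs (PySem.Set.union m (PySem.Set.ofList r)) acc
        have hsub : ∀ z ∈ PySem.Set.union m (PySem.Set.ofList r),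
            z ∈ (rs.foldl pvA_pass (PySem.Set.union m (PySem.Set.ofList r), acc)).1 := by
          intro z hz; rw [hex]; exact List.mem_append_left _ hz
        refine ⟨⟨y, hyr, hsub y ?_⟩, fun z hz => hsub z ?_⟩
        · rw [PySem.Set.mem_union]; exact Or.inl hym
        · rw [PySem.Set.mem_union, PySem.Set.mem_ofList]; exact Or.inr hz
      · exact ih _ acc r htl
    · simp only [if_neg h]
      rcases List.mem_cons.mp hr with heq | htl
      · left
        subst heq
        obtain ⟨ex, hex⟩ := pv_pass_acc rs m (acc ++ [r])
        rw [hex, List.append_assoc]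
        exact List.mem_append_right _ (List.mem_append_left _ (List.mem_singleton_self r))
      · exact ih m (acc ++ [r0]) r htl

theorem pv_pass_kept_sub (rest : List (List Int)) :
    ∀ (m : PySem.Set Int) (acc : List (List Int)), ∀ r ∈ (rest.foldl pvA_pass (m, acc)).2,
    r ∈ acc ∨ r ∈ rest := by
  induction rest with
  | nil => simp
  | cons r0 rs ih =>
    intro m acc r hr
    simp only [List.foldl_cons, pvA_pass] at hr
    split_ifs at hr with h
    · rcases ih _ acc r hr with h1 | h1
      · exact Or.inl h1
      · exact Or.inr (List.mem_cons_of_mem _ h1)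
    · rcases ih m (acc ++ [r0]) r hr with h1 | h1
      · rcases List.mem_append.mp h1 with h2 | h2
        · exact Or.inl h2
        · exact Or.inr (List.mem_cons.mpr (Or.inl (List.mem_singleton.mp h2)))
      · exact Or.inr (List.mem_cons_of_mem _ h1)

theorem pv_pass_filter (rest : List (List Int)) :
    ∀ (m : PySem.Set Int) (acc : List (List Int)) (p : List Int → Bool),
    (∀ r ∈ rest, (∃ y ∈ r, y ∈ (rest.foldl pvA_pass (m, acc)).1) → p r = false) →
    (rest.foldl pvA_pass (m, acc)).2.filter p = acc.filter p ++ rest.filter p := by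
  induction rest with
  | nil => simp
  | cons r rs ih =>
    intro m acc p hp
    simp only [List.foldl_cons, pvA_pass] at hp ⊢
    by_cases h : 0 < (PySem.Set.inter m (PySem.Set.ofList r)).length
    · simp only [if_pos h] at hp ⊢
      have hpr : p r = false := by
        apply hp r (List.mem_cons_self)
        obtain ⟨y, hym, hyr⟩ := pv_inter_mem m r h
        obtain ⟨ex, hex⟩ := pv_pass_mono rs (PySem.Set.union m (PySem.Set.ofList r)) acc
        refine ⟨y, hyr, ?_⟩
        rw [hex]
        exact List.mem_append_left _ (by rw [PySem.Set.mem_union]; exact Or.inl hym)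
      rw [ih _ acc p (fun q hq => hp q (List.mem_cons_of_mem _ hq)), List.filter_cons, hpr]
      simp
    · simp only [if_neg h] at hp ⊢
      rw [ih m (acc ++ [r]) p (fun q hq => hp q (List.mem_cons_of_mem _ hq)),
        List.filter_append, List.filter_cons]
      by_cases hpr : p r = true <;> simp [hpr]

theorem pv_pass_Q (rest : List (List Int)) :
    ∀ (m : PySem.Set Int) (acc : List (List Int)) (seed : List Int) (pool : List (List Int)),
    (∀ r ∈ rest, r ∈ pool) → (∀ z ∈ m, pvQ seed pool z) →
    ∀ z ∈ (rest.foldl pvA_pass (m, acc)).1, pvQ seed pool z := by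
  induction rest with
  | nil => intro m acc seed pool _ hm; simpa using hm
  | cons r rs ih =>
    intro m acc seed pool hpool hm
    simp only [List.foldl_cons, pvA_pass]
    split_ifs with h
    · refine ih _ acc seed pool (fun q hq => hpool q (List.mem_cons_of_mem _ hq)) ?_
      obtain ⟨y, hym, hyr⟩ := pv_inter_mem m r h
      have hreach : pvReach seed pool r := by
        rcases hm y hym with hy | ⟨r', hr', hy'⟩
        · exact pvReach.base r (hpool r List.mem_cons_self) y hyr hy
        · exact pvReach.step r r' (hpool r List.mem_cons_self) hr' y hyr hy'
      intro z hz
      rw [PySem.Set.mem_union] at hz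
      rcases hz with hz | hz
      · exact hm z hz
      · exact Or.inr ⟨r, hreach, (PySem.Set.mem_ofList _ _).mp hz⟩
    · exact ih m (acc ++ [r]) seed pool (fun q hq => hpool q (List.mem_cons_of_mem _ hq)) hm

theorem pv_pass_nodup (rest : List (List Int)) :
    ∀ (m : PySem.Set Int) (acc : List (List Int)), m.Nodup →
    (rest.foldl pvA_pass (m, acc)).1.Nodup := by
  induction rest with
  | nil => intro m acc h; simpa using h
  | cons r rs ih =>
    intro m acc h
    simp only [List.foldl_cons, pvA_pass]
    split_ifs with hc
    · exact ih _ acc (PySem.Set.nodup_union _ _ h)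
    · exact ih m (acc ++ [r]) h

-- A's while loop returns at once when the size test fails, whatever fuel is left
theorem pv_inner_exit (f : Nat) (x : Int) (first : PySem.Set Int) (rest : List (List Int))
    (h : ¬ x < (first.length : Int)) : pvA_inner f x first rest = (first, rest) := by
  cases f <;> simp [pvA_inner, h]

-- isdisjoint vs the decide-form used in the interface
theorem pv_disj_key (m : PySem.Set Int) (r : List Int) :
    PySem.Set.isdisjoint m (PySem.List.dedup r) = decide (∀ y ∈ r, y ∉ m) := by
  by_cases hd : ∀ y ∈ r, y ∉ m
  · rw [decide_eq_true hd]
    rw [PySem.Set.isdisjoint_iff]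
    intro x hx hxd
    exact hd x ((PySem.List.mem_dedup _ _).mp hxd) hx
  · rw [decide_eq_false hd]
    push Not at hd
    obtain ⟨y, hyr, hym⟩ := hd
    rw [← Bool.not_eq_true, PySem.Set.isdisjoint_iff]
    intro hall
    exact hall y hym ((PySem.List.mem_dedup _ _).mpr hyr)

-- a pass that did not grow the set terminates A's inner loop with the post-condition
theorem pvA_inner_stop (rest : List (List Int)) (m : PySem.Set Int)
    (hng : (rest.foldl pvA_pass (m, [])).1 = m) :
    pvPost m rest (m, (rest.foldl pvA_pass (m, [])).2) := by
  have hkept := pv_pass_nogrow rest m [] hng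
  simp only [List.nil_append] at hkept
  have hexit : ∀ r ∈ (rest.foldl pvA_pass (m, [])).2, ∀ y ∈ r, y ∉ m := by
    intro r hr y hy
    rw [hkept, List.mem_filter, pv_disj_key] at hr
    exact of_decide_eq_true hr.2 y hy
  refine ⟨⟨[], by simp⟩, hexit, ?_, ?_, fun seed pool _ hm z hz => hm z hz, fun h => h⟩
  · intro r hr hmeet
    rcases pv_pass_absorbed rest m [] r hr with hk | ⟨_, hsub⟩
    · obtain ⟨y, hyr, hym⟩ := hmeet
      exact absurd hym (hexit r hk y hyr)
    · intro y hy
      have := hsub y hy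
      rwa [hng] at this
  · rw [hkept]
    exact List.filter_congr (fun r _ => pv_disj_key m r)

-- A's inner saturation loop satisfies the common post-condition
theorem pvA_inner_post (n : Nat) : ∀ (rest : List (List Int)), rest.length ≤ n →
    ∀ (fuel : Nat), rest.length + 2 ≤ fuel →
    ∀ (m : PySem.Set Int) (x : Int), x < (m.length : Int) →
    pvPost m rest (pvA_inner fuel x m rest) := by
  induction n with
  | zero =>
    intro rest hlen fuel hfuel m x hx
    have hnil : rest = [] := List.length_eq_zero_iff.mp (Nat.le_zero.mp hlen)
    subst hnil
    obtain ⟨f, rfl⟩ : ∃ f, fuel = f + 1 := ⟨fuel - 1, by omega⟩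
    simp only [pvA_inner, if_pos hx, List.foldl_nil]
    rw [pv_inner_exit f _ _ _ (lt_irrefl _)]
    exact ⟨⟨[], by simp⟩, by simp, by simp, by simp, fun seed pool _ hm z hz => hm z hz, fun h => h⟩
  | succ n ih =>
    intro rest hlen fuel hfuel m x hx
    obtain ⟨f, rfl⟩ : ∃ f, fuel = f + 1 := ⟨fuel - 1, by omega⟩
    simp only [pvA_inner, if_pos hx]
    by_cases hg : m.length < (rest.foldl pvA_pass (m, [])).1.length
    · have hlt : (rest.foldl pvA_pass (m, [])).2.length < rest.length := by
        have := (pvA_pass_len rest m []).2 hg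
        simpa using this
      have hpost := ih (rest.foldl pvA_pass (m, [])).2 (by omega) f (by omega)
        (rest.foldl pvA_pass (m, [])).1 (m.length : Int) (by exact_mod_cast hg)
      obtain ⟨⟨ex2, hex2⟩, hdisj, habs, hfil, hQ, hnd⟩ := hpost
      obtain ⟨ex1, hex1⟩ := pv_pass_mono rest m []
      refine ⟨⟨ex1 ++ ex2, by rw [hex2, hex1, List.append_assoc]⟩, hdisj, ?_, ?_, ?_, ?_⟩
      · intro r hr hmeet
        rcases pv_pass_absorbed rest m [] r hr with hk | ⟨_, hsub⟩
        · exact habs r hk hmeet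
        · intro y hy
          rw [hex2]
          exact List.mem_append_left _ (hsub y hy)
      · rw [hfil]
        have := pv_pass_filter rest m []
          (fun r => decide (∀ y ∈ r,
            y ∉ (pvA_inner f (m.length : Int)
              (rest.foldl pvA_pass (m, [])).1 (rest.foldl pvA_pass (m, [])).2).1))
          (fun r _ hmeet => by
            obtain ⟨y, hyr, hym⟩ := hmeet
            apply decide_eq_false
            intro hall
            exact hall y hyr (by rw [hex2]; exact List.mem_append_left _ hym))
        simpa using this
      · intro seed pool hpool hm
        refine hQ seed pool ?_ (pv_pass_Q rest m [] seed pool hpool hm)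
        intro r hr
        rcases pv_pass_kept_sub rest m [] r hr with h0 | h0
        · exact absurd h0 (List.not_mem_nil)
        · exact hpool r h0
      · intro hndm
        exact hnd (pv_pass_nodup rest m [] hndm)
    · obtain ⟨ex, hex⟩ := pv_pass_mono rest m []
      have hxe : ex = [] := by
        have := congrArg List.length hex
        simp only [List.length_append] at this
        exact List.length_eq_zero_iff.mp (by omega)
      rw [hxe, List.append_nil] at hex
      rw [hex, pv_inner_exit f _ _ _ (lt_irrefl _)]
      exact pvA_inner_stop rest m hex

-- ---- B-side lemmas ----
theorem pvB_push_fst (l : List Int) : ∀ (c : PySem.Set Int) (s : List Int),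
    (l.foldl pvB_push (c, s)).1 = PySem.Set.update c l := by
  induction l with
  | nil => intro c s; simp [PySem.Set.update]
  | cons v vs ih =>
    intro c s
    simp only [List.foldl_cons, pvB_push, PySem.Set.update] at *
    by_cases hv : PySem.Set.contains c v
    · simp only [if_pos hv, ih]
      have hadd : PySem.Set.add c v = c := by
        unfold PySem.Set.add
        rw [if_pos hv]
      rw [hadd]
    · simp only [if_neg hv, ih]

theorem pvB_push_snd (l : List Int) : ∀ (c : PySem.Set Int) (s : List Int) (z : Int),
    z ∈ (l.foldl pvB_push (c, s)).2 ↔ z ∈ s ∨ (z ∈ l ∧ z ∉ c) := by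
  induction l with
  | nil => intro c s z; simp
  | cons v vs ih =>
    intro c s z
    simp only [List.foldl_cons, pvB_push]
    by_cases hv : PySem.Set.contains c v
    · rw [if_pos hv, ih]
      have hvc : v ∈ c := (PySem.Set.contains_iff _ _).mp hv
      constructor
      · rintro (hs | ⟨hz, hnc⟩)
        · exact Or.inl hs
        · exact Or.inr ⟨List.mem_cons_of_mem _ hz, hnc⟩
      · rintro (hs | ⟨hz, hnc⟩)
        · exact Or.inl hs
        · rcases List.mem_cons.mp hz with rfl | hz'
          · exact absurd hvc hnc
          · exact Or.inr ⟨hz', hnc⟩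
    · rw [if_neg hv, ih]
      have hvc : v ∉ c := fun h => hv ((PySem.Set.contains_iff _ _).mpr h)
      simp only [List.mem_append, List.mem_cons, List.not_mem_nil, or_false,
        PySem.Set.mem_add]
      by_cases hzv : z = v
      · subst hzv
        tauto
      · tauto

theorem pvB_push_snd_len (l : List Int) : ∀ (c : PySem.Set Int) (s : List Int),
    (l.foldl pvB_push (c, s)).2.length ≤ s.length + l.length := by
  induction l with
  | nil => intro c s; simp
  | cons v vs ih =>
    intro c s
    simp only [List.foldl_cons, pvB_push, List.length_cons]
    by_cases hv : PySem.Set.contains c v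
    · rw [if_pos hv]
      have := ih c s
      omega
    · rw [if_neg hv]
      have := ih (PySem.Set.add c v) (s ++ [v])
      simp only [List.length_append, List.length_singleton] at this
      omega

theorem pvB_absorb_fst (hits : List (List Int)) : ∀ (c : PySem.Set Int) (s : List Int),
    (hits.foldl (fun st l => l.foldl pvB_push st) (c, s)).1
      = hits.foldl (fun cc l => PySem.Set.update cc l) c := by
  induction hits with
  | nil => intro c s; rfl
  | cons h hs ih =>
    intro c s
    simp only [List.foldl_cons]
    have hfst := pvB_push_fst h c s
    have : h.foldl pvB_push (c, s) = ((h.foldl pvB_push (c, s)).1, (h.foldl pvB_push (c, s)).2) := rfl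
    rw [this, hfst, ih]

theorem pvB_upds_mem (hits : List (List Int)) : ∀ (c : PySem.Set Int) (z : Int),
    z ∈ hits.foldl (fun cc l => PySem.Set.update cc l) c ↔ z ∈ c ∨ ∃ h ∈ hits, z ∈ h := by
  induction hits with
  | nil => intro c z; simp
  | cons h hs ih =>
    intro c z
    simp only [List.foldl_cons, ih, PySem.Set.mem_update]
    constructor
    · rintro ((hc | hh) | ⟨h', hh', hz⟩)
      · exact Or.inl hc
      · exact Or.inr ⟨h, List.mem_cons_self, hh⟩
      · exact Or.inr ⟨h', List.mem_cons_of_mem _ hh', hz⟩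
    · rintro (hc | ⟨h', hh', hz⟩)
      · exact Or.inl (Or.inl hc)
      · rcases List.mem_cons.mp hh' with rfl | hh''
        · exact Or.inl (Or.inr hz)
        · exact Or.inr ⟨h', hh'', hz⟩

theorem pvB_upds_append (hits : List (List Int)) : ∀ (c : PySem.Set Int),
    ∃ ex, hits.foldl (fun cc l => PySem.Set.update cc l) c = c ++ ex := by
  induction hits with
  | nil => exact fun c => ⟨[], by simp⟩
  | cons h hs ih =>
    intro c
    simp only [List.foldl_cons]
    obtain ⟨ex, hex⟩ := ih (PySem.Set.update c h)
    rw [hex, PySem.Set.update_eq_append_filter, List.append_assoc]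
    exact ⟨_, rfl⟩

theorem pvB_upds_nodup (hits : List (List Int)) : ∀ (c : PySem.Set Int), c.Nodup →
    (hits.foldl (fun cc l => PySem.Set.update cc l) c).Nodup := by
  induction hits with
  | nil => exact fun c h => h
  | cons h hs ih =>
    intro c hc
    exact ih _ (PySem.Set.nodup_update _ _ hc)

theorem pvB_absorb_snd (hits : List (List Int)) : ∀ (c : PySem.Set Int) (s : List Int) (z : Int),
    z ∈ (hits.foldl (fun st l => l.foldl pvB_push st) (c, s)).2 ↔
      z ∈ s ∨ ((∃ h ∈ hits, z ∈ h) ∧ z ∉ c) := by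
  induction hits with
  | nil => intro c s z; simp
  | cons h hs ih =>
    intro c s z
    simp only [List.foldl_cons]
    have hstep : h.foldl pvB_push (c, s)
        = ((h.foldl pvB_push (c, s)).1, (h.foldl pvB_push (c, s)).2) := rfl
    rw [hstep, pvB_push_fst h c s, ih, pvB_push_snd h c s z]
    simp only [PySem.Set.mem_update]
    constructor
    · rintro ((hz | ⟨hzh, hzc⟩) | ⟨⟨h', hh', hz⟩, hnu⟩)
      · exact Or.inl hz
      · exact Or.inr ⟨⟨h, List.mem_cons_self, hzh⟩, hzc⟩
      · exact Or.inr ⟨⟨h', List.mem_cons_of_mem _ hh', hz⟩, fun hc => hnu (Or.inl hc)⟩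
    · rintro (hz | ⟨⟨h', hh', hz⟩, hzc⟩)
      · exact Or.inl (Or.inl hz)
      · rcases List.mem_cons.mp hh' with rfl | hh''
        · exact Or.inl (Or.inr ⟨hz, hzc⟩)
        · by_cases hzh : z ∈ h
          · exact Or.inl (Or.inr ⟨hzh, hzc⟩)
          · exact Or.inr ⟨⟨h', hh'', hz⟩, fun hu => hu.elim hzc hzh⟩

theorem pvB_absorb_snd_len (hits : List (List Int)) : ∀ (c : PySem.Set Int) (s : List Int),
    (hits.foldl (fun st l => l.foldl pvB_push st) (c, s)).2.length
      ≤ s.length + (hits.map List.length).sum := by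
  induction hits with
  | nil => intro c s; simp
  | cons h hs ih =>
    intro c s
    simp only [List.foldl_cons, List.map_cons, List.sum_cons]
    have hstep : h.foldl pvB_push (c, s)
        = ((h.foldl pvB_push (c, s)).1, (h.foldl pvB_push (c, s)).2) := rfl
    rw [hstep]
    have h1 := ih (h.foldl pvB_push (c, s)).1 (h.foldl pvB_push (c, s)).2
    have h2 := pvB_push_snd_len h c s
    omega

-- a filter and its complement split the total length
theorem pv_sum_split (p : List Int → Bool) (l : List (List Int)) :
    (((l.filter p).map List.length).sum : Nat)
      + ((l.filter (fun x => !p x)).map List.length).sum = (l.map List.length).sum := by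
  induction l with
  | nil => simp
  | cons h t ih =>
    by_cases hp : p h <;> simp [hp, ← ih] <;> omega

-- an empty worklist terminates B's loop with the post-condition
theorem pvB_dfs_stop (comp : PySem.Set Int) (rest : List (List Int))
    (hi3 : ∀ l ∈ rest, ∀ z ∈ l, z ∈ comp → z ∈ ([] : List Int)) :
    pvPost comp rest (comp, rest) := by
  have hexit : ∀ r ∈ rest, ∀ y ∈ r, y ∉ comp := by
    intro r hr y hy hyc
    simpa using hi3 r hr y hy hyc
  refine ⟨⟨[], by simp⟩, hexit, ?_, ?_, fun seed pool _ hm z hz => hm z hz, fun h => h⟩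
  · intro r hr hmeet
    obtain ⟨y, hyr, hym⟩ := hmeet
    exact absurd hym (hexit r hr y hyr)
  · symm
    apply List.filter_eq_self.mpr
    intro r hr
    exact decide_eq_true (hexit r hr)

-- B's node-worklist loop satisfies the common post-condition
theorem pvB_dfs_post (n : Nat) : ∀ (stack : List Int) (rest : List (List Int)),
    stack.length + (rest.map List.length).sum ≤ n →
    ∀ (fuel : Nat), stack.length + (rest.map List.length).sum + 1 ≤ fuel →
    ∀ (comp : PySem.Set Int), comp.Nodup → (∀ z ∈ stack, z ∈ comp) →
    (∀ l ∈ rest, ∀ z ∈ l, z ∈ comp → z ∈ stack) →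
    pvPost comp rest (pvB_dfs fuel comp stack rest) := by
  induction n with
  | zero =>
    intro stack rest hn fuel hfuel comp h1 h2 h3
    have hst : stack = [] := List.length_eq_zero_iff.mp (by omega)
    subst hst
    obtain ⟨f, rfl⟩ : ∃ f, fuel = f + 1 := ⟨fuel - 1, by omega⟩
    simp only [pvB_dfs, List.getLast?_nil]
    exact pvB_dfs_stop comp rest h3
  | succ n ih =>
    intro stack rest hn fuel hfuel comp h1 h2 h3
    obtain ⟨f, rfl⟩ : ∃ f, fuel = f + 1 := ⟨fuel - 1, by omega⟩
    match hlast : stack.getLast? with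
    | none =>
      have hst : stack = [] := List.getLast?_eq_none_iff.mp hlast
      subst hst
      simp only [pvB_dfs, List.getLast?_nil]
      exact pvB_dfs_stop comp rest h3
    | some node =>
      obtain ⟨ys, rfl⟩ := List.getLast?_eq_some_iff.mp hlast
      simp only [pvB_dfs, hlast, List.dropLast_concat]
      -- abbreviations for the one-step state
      set hits := rest.filter (fun l => decide (node ∈ l)) with hhits
      set rest2 := rest.filter (fun l => !decide (node ∈ l)) with hrest2
      set st := hits.foldl (fun st l => l.foldl pvB_push st) (comp, ys) with hst
      have hnodec : node ∈ comp := h2 node (by simp)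
      -- the new set: membership, growth, nodup
      have hfst := pvB_absorb_fst hits comp ys
      have hfmem : ∀ z, z ∈ st.1 ↔ z ∈ comp ∨ ∃ h ∈ hits, z ∈ h := by
        intro z; rw [hst, hfst]; exact pvB_upds_mem hits comp z
      have hfapp : ∃ ex, st.1 = comp ++ ex := by
        rw [hst, hfst]; exact pvB_upds_append hits comp
      have hfnd : st.1.Nodup := by
        rw [hst, hfst]; exact pvB_upds_nodup hits comp h1
      have hsmem : ∀ z, z ∈ st.2 ↔ z ∈ ys ∨ ((∃ h ∈ hits, z ∈ h) ∧ z ∉ comp) := by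
        intro z; rw [hst]; exact pvB_absorb_snd hits comp ys z
      -- the measure decreases
      have hsum := pv_sum_split (fun l => decide (node ∈ l)) rest
      rw [← hhits, ← hrest2] at hsum
      have hslen : st.2.length ≤ ys.length + (hits.map List.length).sum := by
        rw [hst]; exact pvB_absorb_snd_len hits comp ys
      have hmeas : st.2.length + (rest2.map List.length).sum ≤ n := by
        have h0 : ((ys ++ [node]).length) = ys.length + 1 := by simp
        rw [h0] at hn
        omega
      -- invariants for the recursive call
      have h2' : ∀ z ∈ st.2, z ∈ st.1 := by
        intro z hz
        rcases (hsmem z).mp hz with hzy | ⟨hzh, _⟩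
        · exact (hfmem z).mpr (Or.inl (h2 z (List.mem_append_left _ hzy)))
        · exact (hfmem z).mpr (Or.inr hzh)
      have h3' : ∀ l ∈ rest2, ∀ z ∈ l, z ∈ st.1 → z ∈ st.2 := by
        intro l hl z hzl hzc
        have hlr := List.mem_filter.mp hl
        rcases (hfmem z).mp hzc with hzcomp | hzh
        · have hzs := h3 l hlr.1 z hzl hzcomp
          rcases List.mem_append.mp hzs with hzy | hznode
          · exact (hsmem z).mpr (Or.inl hzy)
          · exfalso
            have : z = node := List.mem_singleton.mp hznode
            subst this
            have : ¬ z ∈ l := by simpa using hlr.2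
            exact this hzl
        · by_cases hzcomp : z ∈ comp
          · have hzs := h3 l hlr.1 z hzl hzcomp
            rcases List.mem_append.mp hzs with hzy | hznode
            · exact (hsmem z).mpr (Or.inl hzy)
            · exfalso
              have : z = node := List.mem_singleton.mp hznode
              subst this
              have : ¬ z ∈ l := by simpa using hlr.2
              exact this hzl
          · exact (hsmem z).mpr (Or.inr ⟨hzh, hzcomp⟩)
      have hpost := ih st.2 rest2 hmeas f
        (by have h0 : (ys ++ [node]).length = ys.length + 1 := by simp
            rw [h0] at hfuel; omega) st.1 hfnd h2' h3' 
      obtain ⟨⟨ex2, hex2⟩, hdisj, habs, hfil, hQ, hnd⟩ := hpost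
      obtain ⟨ex1, hex1⟩ := hfapp
      have hressub : ∀ z ∈ st.1, z ∈ (pvB_dfs f st.1 st.2 rest2).1 := by
        intro z hz; rw [hex2]; exact List.mem_append_left _ hz
      have hsplitmem : ∀ r ∈ rest, r ∈ hits ∨ r ∈ rest2 := by
        intro r hr
        by_cases hnr : node ∈ r
        · exact Or.inl (List.mem_filter.mpr ⟨hr, by simpa using hnr⟩)
        · exact Or.inr (List.mem_filter.mpr ⟨hr, by simpa using hnr⟩)
      refine ⟨⟨ex1 ++ ex2, by rw [hex2, hex1, List.append_assoc]⟩, hdisj, ?_, ?_, ?_, ?_⟩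
      · -- a list meeting the final set is contained in it
        intro r hr hmeet
        rcases hsplitmem r hr with hh | hh
        · intro y hy
          exact hressub y ((hfmem y).mpr (Or.inr ⟨r, hh, hy⟩))
        · exact habs r hh hmeet
      · -- the kept pool is the filter of the disjoint lists
        rw [hfil, hrest2, List.filter_filter, ← hrest2]
        apply List.filter_congr
        intro r hr
        by_cases hp : (∀ y ∈ r, y ∉ (pvB_dfs f st.1 st.2 rest2).1)
        · have hnr : ¬ node ∈ r := fun hnode => hp node hnode (hressub node ((hfmem node).mpr (Or.inl hnodec)))
          simp [hnr]
        · simp [hp]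
      · -- reachability transport
        intro seed pool hpool hm
        refine hQ seed pool (fun r hr => hpool r (List.mem_filter.mp hr).1) ?_
        intro z hz
        rcases (hfmem z).mp hz with hzc | ⟨h, hh, hzh⟩
        · exact hm z hzc
        · have hhr := List.mem_filter.mp hh
          have hreach : pvReach seed pool h := by
            rcases hm node hnodec with hs | ⟨r', hr', hn'⟩
            · exact pvReach.base h (hpool h hhr.1) node (by simpa using hhr.2) hs
            · exact pvReach.step h r' (hpool h hhr.1) hr' node (by simpa using hhr.2) hn'
          exact Or.inr ⟨h, hreach, hzh⟩
      · intro _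
        exact hnd hfnd

-- ---- interface lemmas ----
theorem pv_reach_complete (seed : List Int) (pool : List (List Int)) (M : PySem.Set Int)
    (hseed : ∀ y ∈ seed, y ∈ M)
    (habs : ∀ r ∈ pool, (∃ y ∈ r, y ∈ M) → ∀ y ∈ r, y ∈ M) :
    ∀ r, pvReach seed pool r → ∀ y ∈ r, y ∈ M := by
  intro r hr
  induction hr with
  | base r hrp y hy hs => exact habs r hrp ⟨y, hy, hseed y hs⟩
  | step r r' hrp h y hy hy' ihh => exact habs r hrp ⟨y, hy, ihh y hy'⟩

-- post-condition + seed containment gives the full interface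
theorem pv_post_iface (seed : List Int) (pool : List (List Int))
    (m : PySem.Set Int) (res : PySem.Set Int × List (List Int))
    (hpost : pvPost m pool res) (hnd : m.Nodup)
    (hmem : ∀ z, z ∈ m ↔ z ∈ seed) :
    pvIface seed pool res := by
  obtain ⟨⟨ex, hex⟩, hdisj, habs, hfil, hQ, hndf⟩ := hpost
  have hseedM : ∀ y ∈ seed, y ∈ res.1 := by
    intro y hy
    rw [hex]
    exact List.mem_append_left _ ((hmem y).mpr hy)
  have hcomp := pv_reach_complete seed pool res.1 hseedM habs
  refine ⟨hndf hnd, ?_, hfil⟩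
  intro z
  constructor
  · intro hz
    exact hQ seed pool (fun r hr => hr) (fun w hw => Or.inl ((hmem w).mp hw)) z hz
  · rintro (hs | ⟨r, hr, hz⟩)
    · exact hseedM z hs
    · exact hcomp r hr z hz

theorem pvA_iface (seed : List Int) (rest : List (List Int)) :
    pvIface seed rest (pvA_inner (rest.length + 2) (-1) (PySem.Set.ofList seed) rest) := by
  have hx : (-1 : Int) < ((PySem.Set.ofList seed).length : Int) := by
    have := Int.natCast_nonneg (PySem.Set.ofList seed).length
    omega
  have hpost := pvA_inner_post rest.length rest le_rfl (rest.length + 2) le_rfl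
    (PySem.Set.ofList seed) (-1) hx
  exact pv_post_iface seed rest _ _ hpost (PySem.Set.nodup_ofList _)
    (fun z => PySem.Set.mem_ofList _ _)

theorem pvB_iface (seed : List Int) (rest : List (List Int)) :
    pvIface seed rest
      (pvB_dfs (seed.length + (rest.map List.length).sum + 1)
        (seed.foldl pvB_push (PySem.Set.empty, [])).1
        (seed.foldl pvB_push (PySem.Set.empty, [])).2 rest) := by
  have hc0 : (seed.foldl pvB_push (PySem.Set.empty, [])).1 = PySem.Set.update PySem.Set.empty seed :=
    pvB_push_fst seed _ _
  have hcmem : ∀ z : Int, z ∈ (seed.foldl pvB_push (PySem.Set.empty, [])).1 ↔ z ∈ seed := by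
    intro z
    rw [hc0, PySem.Set.mem_update]
    simp [PySem.Set.empty]
  have hsmem : ∀ z : Int, z ∈ (seed.foldl pvB_push (PySem.Set.empty, [])).2 ↔ z ∈ seed := by
    intro z
    rw [pvB_push_snd seed _ _ z]
    simp [PySem.Set.empty]
  have hnd0 : (seed.foldl pvB_push (PySem.Set.empty, [])).1.Nodup := by
    rw [hc0]
    exact PySem.Set.nodup_update _ _ List.nodup_nil
  have hslen : (seed.foldl pvB_push (PySem.Set.empty, [])).2.length ≤ seed.length := by
    have := pvB_push_snd_len seed PySem.Set.empty []
    simpa using this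
  have hpost := pvB_dfs_post
    ((seed.foldl pvB_push (PySem.Set.empty, [])).2.length + (rest.map List.length).sum)
    (seed.foldl pvB_push (PySem.Set.empty, [])).2 rest le_rfl
    (seed.length + (rest.map List.length).sum + 1) (by omega)
    (seed.foldl pvB_push (PySem.Set.empty, [])).1 hnd0
    (fun z hz => (hcmem z).mpr ((hsmem z).mp hz))
    (fun l hl z hzl hzc => (hsmem z).mpr ((hcmem z).mp hzc))
  exact pv_post_iface seed rest _ _ hpost hnd0 hcmem

-- two nodup lists with the same members have the same sorted order
theorem pv_sorted_eq (l1 l2 : List Int) (h1 : l1.Nodup) (h2 : l2.Nodup)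
    (h : ∀ z : Int, z ∈ l1 ↔ z ∈ l2) :
    PySem.List.sorted l1 (fun x : Int => x) false = PySem.List.sorted l2 (fun x : Int => x) false := by
  have hperm1 : (PySem.List.sorted l1 (fun x : Int => x) false).Perm l1 :=
    PySem.List.sorted_perm l1 (fun x : Int => x) false
  have hpair : (PySem.List.sorted l1 (fun x : Int => x) false).Pairwise
      (fun a b : Int => (fun x : Int => x) a ≤ (fun x : Int => x) b) :=
    PySem.List.sorted_pairwise l1 (fun x : Int => x)
  have hnod : (PySem.List.sorted l1 (fun x : Int => x) false).Nodup := hperm1.nodup_iff.mpr h1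
  have hlt : (PySem.List.sorted l1 (fun x : Int => x) false).Pairwise
      (fun a b : Int => (fun x : Int => x) a < (fun x : Int => x) b) := by
    have hand := List.Pairwise.and hpair hnod
    exact hand.imp (fun hab => lt_of_le_of_ne hab.1 hab.2)
  have hperm2 : (PySem.List.sorted l1 (fun x : Int => x) false).Perm l2 := by
    rw [List.perm_ext_iff_of_nodup hnod h2]
    intro z
    rw [hperm1.mem_iff]
    exact h z
  exact (PySem.List.sorted_eq_of_perm_of_pairwise_lt _ _ _ hperm2 hlt).symm

-- the interface determines the sorted component and the kept pool uniquely
theorem pv_iface_unique (seed : List Int) (pool : List (List Int))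
    (r1 r2 : PySem.Set Int × List (List Int))
    (h1 : pvIface seed pool r1) (h2 : pvIface seed pool r2) :
    PySem.List.sorted r1.1 (fun x : Int => x) false
      = PySem.List.sorted r2.1 (fun x : Int => x) false ∧ r1.2 = r2.2 := by
  obtain ⟨hnd1, hmem1, hfil1⟩ := h1
  obtain ⟨hnd2, hmem2, hfil2⟩ := h2
  have hiff : ∀ z : Int, z ∈ r1.1 ↔ z ∈ r2.1 := by
    intro z
    rw [hmem1 z, hmem2 z]
  refine ⟨pv_sorted_eq r1.1 r2.1 hnd1 hnd2 hiff, ?_⟩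
  rw [hfil1, hfil2]
  apply List.filter_congr
  intro r _
  apply decide_eq_decide.mpr
  constructor
  · intro hall y hy hmem
    exact hall y hy ((hiff y).mpr hmem)
  · intro hall y hy hmem
    exact hall y hy ((hiff y).mp hmem)

theorem pv_outer_eq (fuel : Nat) : ∀ (pool graphs : List (List Int)),
    pvA_outer fuel pool graphs = pvB_outer fuel pool graphs := by
  induction fuel with
  | zero => intro pool graphs; rfl
  | succ f ih =>
    intro pool graphs
    match pool with
    | [] => rfl
    | seed :: rest =>
      simp only [pvA_outer, pvB_outer]
      obtain ⟨hs, hr⟩ := pv_iface_unique seed rest _ _ (pvA_iface seed rest) (pvB_iface seed rest)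
      rw [hs, hr]
      exact ih _ _

-- ===== VERDICT (by name: the statement is the Claim_ definition above) =====
theorem conecting_dict_spec : Claim_equal_conecting_dict := by
  intro dic _
  unfold Spec_conecting_dict conecting_dict conecting_dict_alt
  exact pv_outer_eq _ _ _
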